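-- pv_equiv track=rewrite | github.com/ardeleandrei/actomat | main.py | remove_5char_after_cnp
-- ===== SOURCE A (Python) =====
-- def remove_5char_after_cnp(ocr_text):
--     items = [x.strip() for x in ocr_text.split(',')]
--     cleaned_items = []
--     skip_next = False
--     for i, item in enumerate(items):
--         if skip_next:
--             # skip this item and reset the flag
--             skip_next = False
--             continue
--         if item.strip().upper() == "CNP" and i + 1 < len(items):
--             next_item = items[i + 1].strip()
--             if len(next_item) == 5:
--                 skip_next = True  # skip next
--         cleaned_items.append(item)
--     return ' , '.join(cleaned_items)
-- ===== SOURCE B (Python) =====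
-- def remove_5char_after_cnp(ocr_text):
--     items = [x.strip() for x in ocr_text.split(',')]
--     # Precompute, per position, whether the item is deleted: an item is deleted
--     # exactly when its predecessor is 'CNP' and it has length 5.  A deleted item
--     # (length 5) can never itself read 'CNP' (length 3), so no carry flag is needed.
--     drop = [False] + [prev.upper() == "CNP" and len(cur) == 5
--                       for prev, cur in zip(items, items[1:])]
--     return ' , '.join(item for item, d in zip(items, drop) if not d)
-- ===== Notes on version B (the rewrite author's own statement) =====
-- stated objective: alternative
-- what changed: Replaces A's single-pass loop with a skip_next carry flag by two passes: a precomputed per-position drop table over adjacent pairs (zip), then an index-free filter; faithful because a dropped item has length 5 and so can never itself be the length-3 trigger 'CNP'.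
import Mathlib
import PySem

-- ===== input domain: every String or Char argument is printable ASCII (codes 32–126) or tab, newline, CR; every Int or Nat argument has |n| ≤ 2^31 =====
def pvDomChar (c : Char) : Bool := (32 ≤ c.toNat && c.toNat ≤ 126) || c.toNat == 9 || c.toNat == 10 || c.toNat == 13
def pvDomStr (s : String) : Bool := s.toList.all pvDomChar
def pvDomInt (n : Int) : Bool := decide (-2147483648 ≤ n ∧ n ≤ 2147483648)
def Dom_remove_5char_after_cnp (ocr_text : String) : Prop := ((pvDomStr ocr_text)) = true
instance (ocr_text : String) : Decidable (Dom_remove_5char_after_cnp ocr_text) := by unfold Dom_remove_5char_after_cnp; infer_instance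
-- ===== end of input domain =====

-- B replaces A's single-pass skip_next carry flag by a precomputed per-position
-- drop table (zip of adjacent items) followed by a filtering pass (objective:
-- alternative decomposition, same cost).

-- ===== PORT A =====
-- The for-loop over `enumerate(items)` with state (cleaned_items, skip_next) becomes a
-- structural recursion over the item list carrying the skip flag; `items[i+1]`
-- (guarded by `i + 1 < len(items)`) is the head of the remaining list `rest`.
def pvALoop : List (List Char) → Bool → List (List Char)
  | [], _ => []
  | _ :: rest, true => pvALoop rest false            -- skip this item and reset the flag
  | item :: rest, false =>
      let skip_next : Bool :=
        match rest with
        | next :: _ =>                                -- i + 1 < len(items)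
            PySem.Chars.upper (PySem.Chars.strip item) == "CNP".toList
              && PySem.Chars.len (PySem.Chars.strip next) == 5
        | [] => false
      item :: pvALoop rest skip_next

def remove_5char_after_cnp (ocr_text : String) : String :=
  let items := (PySem.Chars.splitOn ocr_text.toList ",".toList).map PySem.Chars.strip
  String.ofList (PySem.Chars.join " , ".toList (pvALoop items false))

-- ===== PORT B =====
def pvTrigger (prev cur : List Char) : Bool :=
  PySem.Chars.upper prev == "CNP".toList && cur.length == 5

def pvKept (items : List (List Char)) : List (List Char) :=
  let drop := false :: List.zipWith pvTrigger items items.tail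
  ((items.zip drop).filter (fun p => !p.2)).map Prod.fst

def remove_5char_after_cnp_alt (ocr_text : String) : String :=
  let items := (PySem.Chars.splitOn ocr_text.toList ",".toList).map PySem.Chars.strip
  String.ofList (PySem.Chars.join " , ".toList (pvKept items))

-- ===== PRECONDITION & SPEC =====
def Spec_remove_5char_after_cnp (ocr_text : String) (out : String) : Prop := out = remove_5char_after_cnp_alt ocr_text
instance (ocr_text : String) (out : String) : Decidable (Spec_remove_5char_after_cnp ocr_text out) := by unfold Spec_remove_5char_after_cnp; infer_instance

-- ===== CLAIM (what is proved, stated in full; the proofs are below) =====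
def Claim_equal_remove_5char_after_cnp : Prop := ∀ (ocr_text : String), Dom_remove_5char_after_cnp ocr_text → Spec_remove_5char_after_cnp ocr_text (remove_5char_after_cnp ocr_text)

-- ===== LEMMAS AND PROOFS =====

-- strip is idempotent
theorem pv_dropWhile_idem {α : Type} (p : α → Bool) (l : List α) :
    List.dropWhile p (List.dropWhile p l) = List.dropWhile p l := by
  induction l with
  | nil => rfl
  | cons x t ih =>
      by_cases h : p x = true
      · simp [h, ih]
      · simp [h]

theorem pv_dropWhile_of_prefix {α : Type} (p : α → Bool) {u t : List α}
    (hpre : u <+: t) (ht : List.dropWhile p t = t) : List.dropWhile p u = u := by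
  cases u with
  | nil => rfl
  | cons x u' =>
      obtain ⟨r, hr⟩ := hpre
      subst hr
      cases hpx : p x with
      | true =>
          exfalso
          rw [List.cons_append, List.dropWhile_cons_of_pos hpx] at ht
          have := congrArg List.length ht
          have hlen := List.length_dropWhile_le p (u' ++ r)
          simp at this hlen
          omega
      | false => rw [List.dropWhile_cons_of_neg (by simp [hpx])]

theorem pv_strip_strip (l : List Char) :
    PySem.Chars.strip (PySem.Chars.strip l) = PySem.Chars.strip l := by
  unfold PySem.Chars.strip PySem.Chars.lstrip PySem.Chars.rstrip
  set p := PySem.Chars.isspace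
  have h1 : List.dropWhile p (List.dropWhile p l) = List.dropWhile p l :=
    pv_dropWhile_idem p l
  set t := List.dropWhile p l with ht
  -- rstrip t is a prefix of t
  have hpre : (List.dropWhile p t.reverse).reverse <+: t := by
    have : List.dropWhile p t.reverse <:+ t.reverse := List.dropWhile_suffix _
    have := List.reverse_prefix.mpr this
    simpa using this
  have hfix : List.dropWhile p (List.dropWhile p t.reverse).reverse
      = (List.dropWhile p t.reverse).reverse := pv_dropWhile_of_prefix p hpre h1
  rw [hfix, List.reverse_reverse, pv_dropWhile_idem]

-- a stripped item of length 5 can never read "CNP" (upper preserves length)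
theorem pv_trigger_len {x : List Char} (h : pvTrigger x y = true) : y.length = 5 := by
  unfold pvTrigger at h
  simp at h
  exact h.2

theorem pv_trigger_of_len5 {x y : List Char} (hx : x.length = 5) : pvTrigger x y = false := by
  unfold pvTrigger
  have hlen : (PySem.Chars.upper x).length = 5 := by
    simpa [PySem.Chars.upper] using hx
  simp
  intro he
  rw [he] at hlen
  simp at hlen

-- A's trigger condition, on an already-stripped item, is exactly pvTrigger
theorem pv_cond_eq {x y : List Char} (hx : PySem.Chars.strip x = x)
    (hy : PySem.Chars.strip y = y) :
    (PySem.Chars.upper (PySem.Chars.strip x) == "CNP".toList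
      && PySem.Chars.len (PySem.Chars.strip y) == 5) = pvTrigger x y := by
  unfold pvTrigger
  rw [hx, hy]
  have : (PySem.Chars.len y == (5 : Int)) = (y.length == 5) := by
    by_cases h : y.length = 5 <;> simp [PySem.Chars.len, h]
    omega
  rw [this]

-- the core equivalence: carry-flag pass = drop-table-and-filter passes, on stripped items
theorem pv_loop_eq_kept : ∀ (n : Nat) (L : List (List Char)), L.length ≤ n →
    (∀ x ∈ L, PySem.Chars.strip x = x) → pvALoop L false = pvKept L := by
  intro n
  induction n with
  | zero =>
      intro L hL _
      have : L = [] := List.eq_nil_of_length_eq_zero (Nat.le_zero.mp hL)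
      subst this; rfl
  | succ n ih =>
      intro L hL hs
      match L with
      | [] => rfl
      | [x] => simp [pvALoop, pvKept]
      | x :: y :: rest =>
          have hx : PySem.Chars.strip x = x := hs x (by simp)
          have hy : PySem.Chars.strip y = y := hs y (by simp)
          have hcond := pv_cond_eq hx hy
          by_cases htr : pvTrigger x y = true
          · -- the next item is dropped; it has length 5, so it can trigger nothing
            have hy5 : y.length = 5 := pv_trigger_len htr
            have hrec : pvALoop (x :: y :: rest) false = x :: pvALoop rest false := by
              simp only [pvALoop, hcond, htr]
            have hrest : pvALoop rest false = pvKept rest :=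
              ih rest (by simp at hL; omega) (fun z hz => hs z (by simp [hz]))
            rw [hrec, hrest]
            cases rest with
            | nil => simp [pvKept, htr]
            | cons z rest' =>
                have hz : pvTrigger y z = false := pv_trigger_of_len5 hy5
                simp [pvKept, htr, hz]
          · have hfalse : pvTrigger x y = false := by simpa using htr
            have hrec : pvALoop (x :: y :: rest) false = x :: pvALoop (y :: rest) false := by
              simp only [pvALoop, hcond, hfalse]
            have hrest : pvALoop (y :: rest) false = pvKept (y :: rest) :=
              ih (y :: rest) (by simp at hL ⊢; omega) (fun z hz => hs z (by simp at hz ⊢; tauto))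
            rw [hrec, hrest]
            simp [pvKept, hfalse]

-- ===== VERDICT (by name: the statement is the Claim_ definition above) =====
theorem remove_5char_after_cnp_spec : Claim_equal_remove_5char_after_cnp := by
  intro s _
  unfold Spec_remove_5char_after_cnp remove_5char_after_cnp remove_5char_after_cnp_alt
  have h := pv_loop_eq_kept
    ((PySem.Chars.splitOn s.toList ",".toList).map PySem.Chars.strip).length
    ((PySem.Chars.splitOn s.toList ",".toList).map PySem.Chars.strip)
    le_rfl
    (by intro x hx; simp at hx; obtain ⟨y, _, hy⟩ := hx; rw [← hy]; exact pv_strip_strip y)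
  simp only [h]
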